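-- pv_equiv track=rewrite | github.com/patkanyzsu/Mat-prog-rep | nimfunction.py | scoring_nim_dp
-- ===== SOURCE A (Python) =====
-- def scoring_nim_dp(max_size, bonus):
--     G = [[[0]*(max_size+1) for _ in range(max_size+1)]
--                               for _ in range(max_size+1)]
--     for a in range(max_size+1):
--         for b in range(max_size+1):
--             for c in range(max_size+1):
--                 if a==0 and b==0 and c==0:
--                     continue
--                 best = float('-inf')
--                 for i, pile in enumerate((a, b, c)):
--                     for m in range(1, pile+1):
--                         na, nb, nc = a, b, c
--                         if   i==0: na -= m
--                         elif i==1: nb -= m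
--                         else:      nc -= m
--
--                         val = m - G[na][nb][nc]
--                         if na + nb + nc == 0:
--                             val += bonus
--                         best = max(best, val)
--
--                 G[a][b][c] = best
--     return G
-- ===== SOURCE B (Python) =====
-- def omax(o, x):
--     return x if o is None else max(o, x)
--
-- def scoring_nim_dp(max_size, bonus):
--     # O(n^3): running maxima along each pile axis replace the inner loop over move sizes.
--     n = max_size + 1
--     G = []
--     Ma = None            # Ma[b][c] = max over x < a of (-x - G[x][b][c] + bonus*[x+b+c==0])
--     for a in range(n):
--         layer = []
--         Mb = None        # Mb[c] = max over y < b of (-y - layer[y][c] + bonus*[a+y+c==0])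
--         for b in range(n):
--             row = []
--             Mc = None    # max over z < c of (-z - row[z] + bonus*[a+b+z==0])
--             for c in range(n):
--                 best = None
--                 if a > 0:
--                     best = omax(best, a + Ma[b][c])
--                 if b > 0:
--                     best = omax(best, b + Mb[c])
--                 if c > 0:
--                     best = omax(best, c + Mc)
--                 v = 0 if best is None else best
--                 row.append(v)
--                 Mc = omax(Mc, -c - v + (bonus if a + b + c == 0 else 0))
--             layer.append(row)
--             hb = [-b - row[cc] + (bonus if a + b + cc == 0 else 0) for cc in range(n)]
--             Mb = hb if Mb is None else [max(u, w) for u, w in zip(Mb, hb)]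
--         G.append(layer)
--         ha = [[-a - layer[bb][cc] + (bonus if a + bb + cc == 0 else 0) for cc in range(n)]
--               for bb in range(n)]
--         Ma = ha if Ma is None else [[max(u, w) for u, w in zip(r1, r2)]
--                                     for r1, r2 in zip(Ma, ha)]
--     return G
-- ===== Notes on version B (the rewrite author's own statement) =====
-- stated objective: faster
-- what changed: Replaces the innermost loop over every move size m (O(n) per cell) by three running maxima maintained incrementally along each pile axis, so each cell costs O(1); the table is built by appends instead of in-place updates. Intended as faster (O(n^3) vs O(n^4)); a timing run measured 9.81x at the largest size where both implementations finished.
import Mathlib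
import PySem

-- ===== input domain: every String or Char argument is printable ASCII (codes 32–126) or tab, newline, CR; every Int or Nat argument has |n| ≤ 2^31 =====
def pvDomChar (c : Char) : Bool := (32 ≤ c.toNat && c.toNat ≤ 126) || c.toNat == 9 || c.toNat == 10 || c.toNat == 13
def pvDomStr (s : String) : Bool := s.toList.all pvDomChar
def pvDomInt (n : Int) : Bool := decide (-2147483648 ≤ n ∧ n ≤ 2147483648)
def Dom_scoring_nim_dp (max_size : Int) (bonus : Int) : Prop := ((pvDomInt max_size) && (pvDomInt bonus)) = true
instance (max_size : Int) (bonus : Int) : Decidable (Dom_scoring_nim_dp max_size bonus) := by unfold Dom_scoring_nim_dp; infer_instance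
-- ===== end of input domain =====

-- B replaces A's innermost loop over move sizes by running maxima maintained along each
-- pile axis (O(n^3) instead of O(n^4)); intended as faster (a timing run measured
-- 9.81x at the largest size where both implementations finished).

-- ===== PORT A =====

-- G[x][y][z] read (indices always in range in A)
def pvGet3 (G : List (List (List Int))) (x y z : Nat) : Int :=
  ((G.getD x []).getD y []).getD z 0

-- G[x][y][z] = v (indices always in range in A)
def pvSet3 (G : List (List (List Int))) (x y z : Nat) (v : Int) : List (List (List Int)) :=
  G.set x ((G.getD x []).set y (((G.getD x []).getD y []).set z v))

-- A's `best = max(best, val)` with the float('-inf') start modelled as `none`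
-- (never returned: every non-skipped cell has a move)
def pvOMax (o : Option Int) (v : Int) : Option Int :=
  match o with
  | none => some v
  | some u => some (max u v)

-- the body of A's (a,b,c) loop iteration
def pvCellA (bonus : Int) (a b c : Nat) (G : List (List (List Int))) : List (List (List Int)) :=
  if a = 0 ∧ b = 0 ∧ c = 0 then G
  else
    let best := [((0 : Nat), a), (1, b), (2, c)].foldl (fun best ip =>
      (List.range ip.2).foldl (fun best mm =>
        let m := mm + 1
        let na := if ip.1 = 0 then a - m else a
        let nb := if ip.1 = 1 then b - m else b
        let nc := if ip.1 = 2 then c - m else c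
        let val := (m : Int) - pvGet3 G na nb nc + (if na + nb + nc = 0 then bonus else 0)
        pvOMax best val) best) none
    -- `best` is never `none` here (some pile is non-zero), matching Python's float('-inf') sentinel
    pvSet3 G a b c (best.getD 0)

def scoring_nim_dp (max_size : Int) (bonus : Int) : List (List (List Int)) :=
  let n := (max_size + 1).toNat  -- range(max_size+1): loop variables are the Nats 0..max_size
  (List.range n).foldl (fun G a =>
    (List.range n).foldl (fun G b =>
      (List.range n).foldl (fun G c => pvCellA bonus a b c G) G) G)
    (List.replicate n (List.replicate n (List.replicate n (0 : Int))))

-- ===== PORT B =====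

-- Source B's `omax(o, x)` helper (None is `none`)
def pvOMaxB (o : Option Int) (v : Int) : Option Int :=
  match o with
  | none => some v
  | some u => some (max u v)

-- M[y][z] read (indices always in range in B)
def pvGet2 (M : List (List Int)) (y z : Nat) : Int := (M.getD y []).getD z 0

-- body of B's innermost (c) loop: state (row, Mc)
def pvCellB (bonus : Int) (a b : Nat) (Ma : Option (List (List Int))) (Mb : Option (List Int))
    (r : List Int × Option Int) (c : Nat) : List Int × Option Int :=
  let row := r.1
  let Mc := r.2
  let best : Option Int := none
  let best := if 0 < a then pvOMaxB best ((a : Int) + pvGet2 (Ma.getD []) b c) else best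
  let best := if 0 < b then pvOMaxB best ((b : Int) + (Mb.getD []).getD c 0) else best
  let best := if 0 < c then pvOMaxB best ((c : Int) + Mc.getD 0) else best
  let v := best.getD 0
  (row ++ [v], pvOMaxB Mc (-(c : Int) - v + (if a + b + c = 0 then bonus else 0)))

-- body of B's middle (b) loop: state (layer, Mb)
def pvRowB (bonus : Int) (n a : Nat) (Ma : Option (List (List Int)))
    (t : List (List Int) × Option (List Int)) (b : Nat) : List (List Int) × Option (List Int) :=
  let layer := t.1
  let Mb := t.2
  let r := (List.range n).foldl (pvCellB bonus a b Ma Mb) ([], none)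
  let row := r.1
  let hb := (List.range n).map (fun cc =>
    -(b : Int) - row.getD cc 0 + (if a + b + cc = 0 then bonus else 0))
  (layer ++ [row], some (match Mb with | none => hb | some M => List.zipWith max M hb))

-- body of B's outer (a) loop: state (G, Ma)
def pvLayerB (bonus : Int) (n : Nat)
    (s : List (List (List Int)) × Option (List (List Int))) (a : Nat) :
    List (List (List Int)) × Option (List (List Int)) :=
  let G := s.1
  let Ma := s.2
  let t := (List.range n).foldl (pvRowB bonus n a Ma) ([], none)
  let layer := t.1
  let ha := (List.range n).map (fun bb => (List.range n).map (fun cc =>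
    -(a : Int) - pvGet2 layer bb cc + (if a + bb + cc = 0 then bonus else 0)))
  (G ++ [layer],
   some (match Ma with | none => ha | some M => List.zipWith (fun r1 r2 => List.zipWith max r1 r2) M ha))

def scoring_nim_dp_alt (max_size : Int) (bonus : Int) : List (List (List Int)) :=
  let n := (max_size + 1).toNat
  ((List.range n).foldl (pvLayerB bonus n) ([], none)).1

-- ===== PRECONDITION & SPEC =====
def Spec_scoring_nim_dp (max_size : Int) (bonus : Int) (out : List (List (List Int))) : Prop := out = scoring_nim_dp_alt max_size bonus
instance (max_size : Int) (bonus : Int) (out : List (List (List Int))) : Decidable (Spec_scoring_nim_dp max_size bonus out) := by unfold Spec_scoring_nim_dp; infer_instance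

-- ===== CLAIM (what is proved, stated in full; the proofs are below) =====
def Claim_equal_scoring_nim_dp : Prop := ∀ (max_size : Int) (bonus : Int), Dom_scoring_nim_dp max_size bonus → Spec_scoring_nim_dp max_size bonus (scoring_nim_dp max_size bonus)

-- ===== LEMMAS AND PROOFS =====

-- Option-level max (pvOMax with an optional second argument)
def pvOMax2 : Option Int → Option Int → Option Int
  | o, none => o
  | none, some v => some v
  | some u, some v => some (max u v)

-- max of a list of Ints, none on []
def pvMaxL : List Int → Option Int
  | [] => none
  | x :: l => pvOMax2 (some x) (pvMaxL l)

def pvBeta (bonus : Int) (s : Nat) : Int := if s = 0 then bonus else 0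

-- the mathematical DP value: optimal score difference at position (a,b,c)
def pvG (bonus : Int) (a b c : Nat) : Int :=
  if a = 0 ∧ b = 0 ∧ c = 0 then 0
  else
    (pvOMax2 (pvOMax2
      (Option.map (fun m => (a : Int) + m)
        (pvMaxL ((List.range a).attach.map (fun x =>
          -(x.1 : Int) - pvG bonus x.1 b c + pvBeta bonus (x.1 + b + c)))))
      (Option.map (fun m => (b : Int) + m)
        (pvMaxL ((List.range b).attach.map (fun y =>
          -(y.1 : Int) - pvG bonus a y.1 c + pvBeta bonus (a + y.1 + c))))))
      (Option.map (fun m => (c : Int) + m)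
        (pvMaxL ((List.range c).attach.map (fun z =>
          -(z.1 : Int) - pvG bonus a b z.1 + pvBeta bonus (a + b + z.1)))))).getD 0
termination_by a + b + c
decreasing_by
  · have := x.2; simp only [List.mem_range] at this; omega
  · have := y.2; simp only [List.mem_range] at this; omega
  · have := z.2; simp only [List.mem_range] at this; omega

def pvHA (bonus : Int) (x y z : Nat) : Int := -(x : Int) - pvG bonus x y z + pvBeta bonus (x + y + z)
def pvHB (bonus : Int) (a y z : Nat) : Int := -(y : Int) - pvG bonus a y z + pvBeta bonus (a + y + z)
def pvHC (bonus : Int) (a b z : Nat) : Int := -(z : Int) - pvG bonus a b z + pvBeta bonus (a + b + z)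

def pvAxA (bonus : Int) (a b c : Nat) : Option Int := pvMaxL ((List.range a).map (fun x => pvHA bonus x b c))
def pvAxB (bonus : Int) (a b c : Nat) : Option Int := pvMaxL ((List.range b).map (fun y => pvHB bonus a y c))
def pvAxC (bonus : Int) (a b c : Nat) : Option Int := pvMaxL ((List.range c).map (fun z => pvHC bonus a b z))

lemma pvG_eq (bonus : Int) (a b c : Nat) :
    pvG bonus a b c =
      if a = 0 ∧ b = 0 ∧ c = 0 then 0
      else (pvOMax2 (pvOMax2
            (Option.map (fun m => (a : Int) + m) (pvAxA bonus a b c))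
            (Option.map (fun m => (b : Int) + m) (pvAxB bonus a b c)))
            (Option.map (fun m => (c : Int) + m) (pvAxC bonus a b c))).getD 0 := by
  conv_lhs => rw [pvG]
  rw [List.attach_map_val (l := List.range a)
        (f := fun x => -(x : Int) - pvG bonus x b c + pvBeta bonus (x + b + c)),
      List.attach_map_val (l := List.range b)
        (f := fun y => -(y : Int) - pvG bonus a y c + pvBeta bonus (a + y + c)),
      List.attach_map_val (l := List.range c)
        (f := fun z => -(z : Int) - pvG bonus a b z + pvBeta bonus (a + b + z))]
  simp only [pvAxA, pvAxB, pvAxC, pvHA, pvHB, pvHC]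

lemma pvG_zero (bonus : Int) : pvG bonus 0 0 0 = 0 := by
  rw [pvG_eq]; simp

-- ---- small algebra of pvOMax2 / pvMaxL ----
lemma pvOMax_eq_omax2 (o : Option Int) (v : Int) : pvOMax o v = pvOMax2 o (some v) := by
  cases o <;> rfl

lemma pvOMaxB_eq_omax2 (o : Option Int) (v : Int) : pvOMaxB o v = pvOMax2 o (some v) := by
  cases o <;> rfl

lemma pvOMax2_none_left (o : Option Int) : pvOMax2 none o = o := by cases o <;> rfl

lemma pvOMax2_assoc (o1 o2 o3 : Option Int) :
    pvOMax2 (pvOMax2 o1 o2) o3 = pvOMax2 o1 (pvOMax2 o2 o3) := by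
  cases o1 <;> cases o2 <;> cases o3 <;> simp [pvOMax2, max_assoc]

lemma pvOMax2_comm (o1 o2 : Option Int) : pvOMax2 o1 o2 = pvOMax2 o2 o1 := by
  cases o1 <;> cases o2 <;> simp [pvOMax2, max_comm]

lemma pvMaxL_append (l1 l2 : List Int) :
    pvMaxL (l1 ++ l2) = pvOMax2 (pvMaxL l1) (pvMaxL l2) := by
  induction l1 with
  | nil => simp [pvMaxL, pvOMax2_none_left]
  | cons x l ih => simp [pvMaxL, ih, pvOMax2_assoc]

lemma pvFold_bridge {α : Type} (l : List α) (f : α → Int) (o : Option Int) :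
    l.foldl (fun o x => pvOMax o (f x)) o = pvOMax2 o (pvMaxL (l.map f)) := by
  induction l generalizing o with
  | nil => simp [pvMaxL]; rfl
  | cons x l ih =>
      simp only [List.foldl_cons, List.map_cons, pvMaxL]
      rw [ih, pvOMax_eq_omax2, pvOMax2_assoc]

lemma pvOMax2_map_add (k : Int) (o1 o2 : Option Int) :
    pvOMax2 (Option.map (fun m => k + m) o1) (Option.map (fun m => k + m) o2)
      = Option.map (fun m => k + m) (pvOMax2 o1 o2) := by
  cases o1 <;> cases o2 <;> simp [pvOMax2, max_add_add_left]

lemma pvMaxL_map_add (k : Int) (l : List Int) :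
    pvMaxL (l.map (fun x => k + x)) = Option.map (fun m => k + m) (pvMaxL l) := by
  induction l with
  | nil => simp [pvMaxL]
  | cons x l ih => simp only [List.map_cons, pvMaxL, ih]; rw [← pvOMax2_map_add]; rfl

lemma pvMaxL_reflect (n : Nat) (f : Nat → Int) :
    pvMaxL ((List.range n).map (fun i => f (n - 1 - i))) = pvMaxL ((List.range n).map f) := by
  induction n generalizing f with
  | zero => simp
  | succ m ih =>
      have hL : pvMaxL ((List.range (m + 1)).map (fun i => f (m + 1 - 1 - i)))
          = pvOMax2 (some (f m)) (pvMaxL ((List.range m).map f)) := by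
        rw [List.range_succ_eq_map]
        simp only [List.map_cons, List.map_map]
        have h1 : ((fun i => f (m + 1 - 1 - i)) ∘ Nat.succ) = fun i => f (m - 1 - i) := by
          funext i; simp only [Function.comp]; congr 1; omega
        have h2 : m + 1 - 1 - 0 = m := by omega
        rw [h1, h2,
          show pvMaxL (f m :: (List.range m).map (fun i => f (m - 1 - i)))
            = pvOMax2 (some (f m)) (pvMaxL ((List.range m).map (fun i => f (m - 1 - i)))) from rfl,
          ih f]
      have hR : pvMaxL ((List.range (m + 1)).map f)
          = pvOMax2 (pvMaxL ((List.range m).map f)) (some (f m)) := by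
        rw [List.range_succ, List.map_append, pvMaxL_append]
        rfl
      rw [hL, hR, pvOMax2_comm]

lemma pvMaxL_some (l : List Int) (h : l ≠ []) : pvMaxL l = some ((pvMaxL l).getD 0) := by
  cases l with
  | nil => exact absurd rfl h
  | cons x l => cases hl : pvMaxL l <;> simp [pvMaxL, hl, pvOMax2]


lemma pvG_eq' (bonus : Int) (a b c : Nat) :
    pvG bonus a b c = (pvOMax2 (pvOMax2
        (Option.map (fun m => (a : Int) + m) (pvAxA bonus a b c))
        (Option.map (fun m => (b : Int) + m) (pvAxB bonus a b c)))
        (Option.map (fun m => (c : Int) + m) (pvAxC bonus a b c))).getD 0 := by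
  rw [pvG_eq]; split_ifs with h
  · obtain ⟨rfl, rfl, rfl⟩ := h; rfl
  · rfl

def pvMaxA (bonus : Int) (a b c : Nat) : Int := (pvAxA bonus a b c).getD 0
def pvMaxB (bonus : Int) (a b c : Nat) : Int := (pvAxB bonus a b c).getD 0

lemma pvAxA_some (bonus : Int) {a : Nat} (b c : Nat) (h : 0 < a) :
    pvAxA bonus a b c = some (pvMaxA bonus a b c) :=
  pvMaxL_some _ (by simp [List.range_eq_nil]; omega)

lemma pvAxB_some (bonus : Int) (a : Nat) {b : Nat} (c : Nat) (h : 0 < b) :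
    pvAxB bonus a b c = some (pvMaxB bonus a b c) :=
  pvMaxL_some _ (by simp [List.range_eq_nil]; omega)

lemma pvAxC_some (bonus : Int) (a b : Nat) {c : Nat} (h : 0 < c) :
    pvAxC bonus a b c = some ((pvAxC bonus a b c).getD 0) :=
  pvMaxL_some _ (by simp [List.range_eq_nil]; omega)

lemma pvAxA_succ (bonus : Int) (a b c : Nat) :
    pvAxA bonus (a + 1) b c = pvOMax2 (pvAxA bonus a b c) (some (pvHA bonus a b c)) := by
  unfold pvAxA; rw [List.range_succ, List.map_append, pvMaxL_append]; rfl

lemma pvAxB_succ (bonus : Int) (a b c : Nat) :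
    pvAxB bonus a (b + 1) c = pvOMax2 (pvAxB bonus a b c) (some (pvHB bonus a b c)) := by
  unfold pvAxB; rw [List.range_succ, List.map_append, pvMaxL_append]; rfl

lemma pvAxC_succ (bonus : Int) (a b c : Nat) :
    pvAxC bonus a b (c + 1) = pvOMax2 (pvAxC bonus a b c) (some (pvHC bonus a b c)) := by
  unfold pvAxC; rw [List.range_succ, List.map_append, pvMaxL_append]; rfl

lemma pvMaxA_succ (bonus : Int) {a : Nat} (b c : Nat) (h : 0 < a) :
    pvMaxA bonus (a + 1) b c = max (pvMaxA bonus a b c) (pvHA bonus a b c) := by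
  unfold pvMaxA
  rw [pvAxA_succ, pvAxA_some bonus b c h]
  rfl

lemma pvMaxB_succ (bonus : Int) (a : Nat) {b : Nat} (c : Nat) (h : 0 < b) :
    pvMaxB bonus a (b + 1) c = max (pvMaxB bonus a b c) (pvHB bonus a b c) := by
  unfold pvMaxB
  rw [pvAxB_succ, pvAxB_some bonus a c h]
  rfl

-- ---- functional tables ----
def pvMk1 (n : Nat) (f : Nat → Int) : List Int := (List.range n).map f
def pvMk2 (n : Nat) (f : Nat → Nat → Int) : List (List Int) := (List.range n).map (fun y => pvMk1 n (f y))
def pvMk3 (n : Nat) (f : Nat → Nat → Nat → Int) : List (List (List Int)) :=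
  (List.range n).map (fun x => pvMk2 n (f x))

lemma pvMk1_congr {n : Nat} {f g : Nat → Int} (h : ∀ i, i < n → f i = g i) :
    pvMk1 n f = pvMk1 n g :=
  List.map_congr_left (fun i hi => h i (List.mem_range.mp hi))

lemma pvMk2_congr {n : Nat} {f g : Nat → Nat → Int} (h : ∀ i j, i < n → j < n → f i j = g i j) :
    pvMk2 n f = pvMk2 n g :=
  List.map_congr_left (fun i hi => pvMk1_congr (fun j hj => h i j (List.mem_range.mp hi) hj))

lemma pvMk3_congr {n : Nat} {f g : Nat → Nat → Nat → Int}
    (h : ∀ i j k, i < n → j < n → k < n → f i j k = g i j k) :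
    pvMk3 n f = pvMk3 n g :=
  List.map_congr_left (fun i hi =>
    pvMk2_congr (fun j k hj hk => h i j k (List.mem_range.mp hi) hj hk))

lemma pvGetD_mk1 {n i : Nat} (f : Nat → Int) (d : Int) (h : i < n) :
    (pvMk1 n f).getD i d = f i := PySem.List.getD_map_range f n i d h

lemma pvGet2_mk2 {n y z : Nat} (f : Nat → Nat → Int) (hy : y < n) (hz : z < n) :
    pvGet2 (pvMk2 n f) y z = f y z := by
  unfold pvGet2 pvMk2
  rw [PySem.List.getD_map_range _ n y [] hy, pvGetD_mk1 _ _ hz]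

lemma pvGet3_mk3 {n x y z : Nat} (f : Nat → Nat → Nat → Int) (hx : x < n) (hy : y < n) (hz : z < n) :
    pvGet3 (pvMk3 n f) x y z = f x y z := by
  unfold pvGet3 pvMk3
  rw [PySem.List.getD_map_range _ n x [] hx]
  exact pvGet2_mk2 (f x) hy hz

lemma pvSet_map_range {β : Type} (n i : Nat) (f : Nat → β) (w : β) (_ : i < n) :
    ((List.range n).map f).set i w = (List.range n).map (fun j => if j = i then w else f j) := by
  apply List.ext_getElem
  · simp
  · intro j h1 h2
    simp only [List.length_set, List.length_map, List.length_range] at h1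
    simp only [List.getElem_set, List.getElem_map, List.getElem_range]
    split_ifs <;> first | rfl | omega

lemma pvSet3_mk3 {n a b c : Nat} (F : Nat → Nat → Nat → Int) (v : Int)
    (ha : a < n) (hb : b < n) (hc : c < n) :
    pvSet3 (pvMk3 n F) a b c v
      = pvMk3 n (fun x y z => if x = a ∧ y = b ∧ z = c then v else F x y z) := by
  have g1 : (pvMk3 n F).getD a [] = pvMk2 n (F a) := by
    unfold pvMk3; exact PySem.List.getD_map_range _ n a [] ha
  have g2 : (pvMk2 n (F a)).getD b [] = pvMk1 n (F a b) := by
    unfold pvMk2; exact PySem.List.getD_map_range _ n b [] hb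
  unfold pvSet3
  rw [g1, g2]
  have e1 : (pvMk1 n (F a b)).set c v = pvMk1 n (fun z => if z = c then v else F a b z) :=
    pvSet_map_range n c (F a b) v hc
  rw [e1]
  have e2 : (pvMk2 n (F a)).set b (pvMk1 n (fun z => if z = c then v else F a b z))
      = (List.range n).map (fun y => if y = b then pvMk1 n (fun z => if z = c then v else F a b z)
          else pvMk1 n (F a y)) := pvSet_map_range n b _ _ hb
  rw [e2]
  have e3 := pvSet_map_range n a (fun x => pvMk2 n (F x))
    ((List.range n).map (fun y => if y = b then pvMk1 n (fun z => if z = c then v else F a b z)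
      else pvMk1 n (F a y))) ha
  rw [show pvMk3 n F = (List.range n).map (fun x => pvMk2 n (F x)) from rfl, e3]
  apply List.map_congr_left
  intro x hx
  by_cases hxa : x = a
  · subst hxa
    rw [if_pos rfl]
    apply List.map_congr_left
    intro y hy
    by_cases hyb : y = b
    · subst hyb
      rw [if_pos rfl]
      apply pvMk1_congr
      intro z _
      by_cases hzc : z = c <;> simp [hzc]
    · rw [if_neg hyb]
      apply pvMk1_congr
      intro z _
      simp [hyb]
  · rw [if_neg hxa]
    apply pvMk2_congr
    intro y z _ _
    simp [hxa]


lemma pvZipSelf {α β : Type} (h : α → α → β) (l : List α) :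
    List.zipWith h l l = l.map (fun x => h x x) := by
  induction l with
  | nil => rfl
  | cons x l ih => simp [ih]

lemma pvZip1 (n : Nat) (f g : Nat → Int) :
    List.zipWith max (pvMk1 n f) (pvMk1 n g) = pvMk1 n (fun i => max (f i) (g i)) := by
  unfold pvMk1
  rw [List.zipWith_map_left, List.zipWith_map_right, pvZipSelf]

lemma pvZip2 (n : Nat) (F G : Nat → Nat → Int) :
    List.zipWith (fun r1 r2 => List.zipWith max r1 r2) (pvMk2 n F) (pvMk2 n G)
      = pvMk2 n (fun y z => max (F y z) (G y z)) := by
  unfold pvMk2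
  rw [List.zipWith_map_left, List.zipWith_map_right, pvZipSelf]
  exact List.map_congr_left (fun y _ => pvZip1 n (F y) (G y))

-- ---- foldl over List.range with an invariant ----
lemma pvFoldInv {α : Type} (n : Nat) (f : α → Nat → α) (P : Nat → α → Prop) (s0 : α)
    (h0 : P 0 s0) (hs : ∀ i s, i < n → P i s → P (i + 1) (f s i)) :
    P n ((List.range n).foldl f s0) := by
  induction n with
  | zero => simpa using h0
  | succ m ih =>
      rw [List.range_succ, List.foldl_append, List.foldl_cons, List.foldl_nil]
      exact hs m _ (by omega) (ih (fun i s hi hP => hs i s (by omega) hP))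

-- ---- A-side: the lexicographically-partial table ----
def pvTbl (bonus : Int) (a b c x y z : Nat) : Int :=
  if x < a ∨ (x = a ∧ (y < b ∨ (y = b ∧ z < c))) then pvG bonus x y z else 0

lemma pvCellA_step (bonus : Int) (n a b c : Nat) (ha : a < n) (hb : b < n) (hc : c < n) :
    pvCellA bonus a b c (pvMk3 n (pvTbl bonus a b c)) = pvMk3 n (pvTbl bonus a b (c + 1)) := by
  by_cases h0 : a = 0 ∧ b = 0 ∧ c = 0
  · unfold pvCellA
    rw [if_pos h0]
    obtain ⟨rfl, rfl, rfl⟩ := h0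
    apply pvMk3_congr
    intro x y z _ _ _
    unfold pvTbl
    rw [if_neg (by omega)]
    by_cases hc2 : x < 0 ∨ (x = 0 ∧ (y < 0 ∨ (y = 0 ∧ z < 0 + 1)))
    · have hx0 : x = 0 := by omega
      have hy0 : y = 0 := by omega
      have hz0 : z = 0 := by omega
      subst hx0; subst hy0; subst hz0
      rw [if_pos hc2, pvG_zero]
    · rw [if_neg hc2]
  · have mapA : pvMaxL ((List.range a).map (fun mm =>
        ((mm + 1 : Nat) : Int) - pvGet3 (pvMk3 n (pvTbl bonus a b c)) (a - (mm + 1)) b c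
          + (if a - (mm + 1) + b + c = 0 then bonus else 0)))
        = Option.map (fun m => (a : Int) + m) (pvAxA bonus a b c) := by
      have hcongr : (List.range a).map (fun mm =>
          ((mm + 1 : Nat) : Int) - pvGet3 (pvMk3 n (pvTbl bonus a b c)) (a - (mm + 1)) b c
            + (if a - (mm + 1) + b + c = 0 then bonus else 0))
          = (List.range a).map (fun mm => (a : Int) + pvHA bonus (a - 1 - mm) b c) := by
        apply List.map_congr_left
        intro mm hmm
        rw [List.mem_range] at hmm
        have hidx : a - (mm + 1) = a - 1 - mm := by omega
        rw [hidx, pvGet3_mk3 _ (by omega) hb hc]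
        unfold pvTbl
        rw [if_pos (Or.inl (by omega))]
        unfold pvHA pvBeta
        generalize pvG bonus (a - 1 - mm) b c = P
        generalize (if a - 1 - mm + b + c = 0 then bonus else (0 : Int)) = Q
        omega
      rw [hcongr, pvMaxL_reflect a (fun x => (a : Int) + pvHA bonus x b c),
        show (List.range a).map (fun x => (a : Int) + pvHA bonus x b c)
            = ((List.range a).map (fun x => pvHA bonus x b c)).map (fun x => (a : Int) + x) by
          rw [List.map_map]; rfl,
        pvMaxL_map_add]
      rfl
    have mapB : pvMaxL ((List.range b).map (fun mm =>
        ((mm + 1 : Nat) : Int) - pvGet3 (pvMk3 n (pvTbl bonus a b c)) a (b - (mm + 1)) c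
          + (if a + (b - (mm + 1)) + c = 0 then bonus else 0)))
        = Option.map (fun m => (b : Int) + m) (pvAxB bonus a b c) := by
      have hcongr : (List.range b).map (fun mm =>
          ((mm + 1 : Nat) : Int) - pvGet3 (pvMk3 n (pvTbl bonus a b c)) a (b - (mm + 1)) c
            + (if a + (b - (mm + 1)) + c = 0 then bonus else 0))
          = (List.range b).map (fun mm => (b : Int) + pvHB bonus a (b - 1 - mm) c) := by
        apply List.map_congr_left
        intro mm hmm
        rw [List.mem_range] at hmm
        have hidx : b - (mm + 1) = b - 1 - mm := by omega
        rw [hidx, pvGet3_mk3 _ ha (by omega) hc]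
        unfold pvTbl
        rw [if_pos (Or.inr ⟨rfl, Or.inl (by omega)⟩)]
        unfold pvHB pvBeta
        generalize pvG bonus a (b - 1 - mm) c = P
        generalize (if a + (b - 1 - mm) + c = 0 then bonus else (0 : Int)) = Q
        omega
      rw [hcongr, pvMaxL_reflect b (fun y => (b : Int) + pvHB bonus a y c),
        show (List.range b).map (fun y => (b : Int) + pvHB bonus a y c)
            = ((List.range b).map (fun y => pvHB bonus a y c)).map (fun x => (b : Int) + x) by
          rw [List.map_map]; rfl,
        pvMaxL_map_add]
      rfl
    have mapC : pvMaxL ((List.range c).map (fun mm =>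
        ((mm + 1 : Nat) : Int) - pvGet3 (pvMk3 n (pvTbl bonus a b c)) a b (c - (mm + 1))
          + (if a + b + (c - (mm + 1)) = 0 then bonus else 0)))
        = Option.map (fun m => (c : Int) + m) (pvAxC bonus a b c) := by
      have hcongr : (List.range c).map (fun mm =>
          ((mm + 1 : Nat) : Int) - pvGet3 (pvMk3 n (pvTbl bonus a b c)) a b (c - (mm + 1))
            + (if a + b + (c - (mm + 1)) = 0 then bonus else 0))
          = (List.range c).map (fun mm => (c : Int) + pvHC bonus a b (c - 1 - mm)) := by
        apply List.map_congr_left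
        intro mm hmm
        rw [List.mem_range] at hmm
        have hidx : c - (mm + 1) = c - 1 - mm := by omega
        rw [hidx, pvGet3_mk3 _ ha hb (by omega)]
        unfold pvTbl
        rw [if_pos (Or.inr ⟨rfl, Or.inr ⟨rfl, by omega⟩⟩)]
        unfold pvHC pvBeta
        generalize pvG bonus a b (c - 1 - mm) = P
        generalize (if a + b + (c - 1 - mm) = 0 then bonus else (0 : Int)) = Q
        omega
      rw [hcongr, pvMaxL_reflect c (fun z => (c : Int) + pvHC bonus a b z),
        show (List.range c).map (fun z => (c : Int) + pvHC bonus a b z)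
            = ((List.range c).map (fun z => pvHC bonus a b z)).map (fun x => (c : Int) + x) by
          rw [List.map_map]; rfl,
        pvMaxL_map_add]
      rfl
    unfold pvCellA
    rw [if_neg h0]
    simp only [List.foldl_cons, List.foldl_nil,
      show ((0 : Nat) = 1) = False from by decide, show ((0 : Nat) = 2) = False from by decide,
      show ((1 : Nat) = 0) = False from by decide, show ((1 : Nat) = 2) = False from by decide,
      show ((2 : Nat) = 0) = False from by decide, show ((2 : Nat) = 1) = False from by decide,
      reduceIte, Nat.sub_zero]
    rw [pvFold_bridge, pvFold_bridge, pvFold_bridge, pvOMax2_none_left]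
    rw [mapA, mapB, mapC]
    rw [← pvG_eq' bonus a b c]
    rw [pvSet3_mk3 _ _ ha hb hc]
    apply pvMk3_congr
    intro x y z _ _ _
    by_cases hxyz : x = a ∧ y = b ∧ z = c
    · rw [if_pos hxyz]
      obtain ⟨rfl, rfl, rfl⟩ := hxyz
      unfold pvTbl
      rw [if_pos (Or.inr ⟨rfl, Or.inr ⟨rfl, by omega⟩⟩)]
    · rw [if_neg hxyz]
      unfold pvTbl
      split_ifs with h1 h2 <;> first | rfl | (exfalso; omega)

lemma portA_eq (max_size bonus : Int) :
    scoring_nim_dp max_size bonus = pvMk3 (max_size + 1).toNat (pvG bonus) := by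
  simp only [scoring_nim_dp]
  set n := (max_size + 1).toNat with hn
  have hinit : List.replicate n (List.replicate n (List.replicate n (0 : Int)))
      = pvMk3 n (pvTbl bonus 0 0 0) := by
    have h1 : pvMk3 n (pvTbl bonus 0 0 0) = pvMk3 n (fun _ _ _ => 0) := by
      apply pvMk3_congr
      intro x y z _ _ _
      unfold pvTbl
      rw [if_neg (by omega)]
    rw [h1]
    unfold pvMk3 pvMk2 pvMk1
    simp
  have stepb : ∀ a, a < n → ∀ b G, b < n → G = pvMk3 n (pvTbl bonus a b 0) →
      (List.range n).foldl (fun G c => pvCellA bonus a b c G) G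
        = pvMk3 n (pvTbl bonus a (b + 1) 0) := by
    intro a haa b G hbb hGb
    subst hGb
    have r := pvFoldInv n (fun G c => pvCellA bonus a b c G)
      (fun c G => G = pvMk3 n (pvTbl bonus a b c)) _ rfl
      (fun c G hcc hGc => by rw [hGc]; exact pvCellA_step bonus n a b c haa hbb hcc)
    refine r.trans ?_
    apply pvMk3_congr
    intro x y z _ _ hz
    unfold pvTbl
    split_ifs with h1 h2 <;> first | rfl | (exfalso; omega)
  have stepa : ∀ a G, a < n → G = pvMk3 n (pvTbl bonus a 0 0) →
      (List.range n).foldl (fun G b => (List.range n).foldl (fun G c => pvCellA bonus a b c G) G) G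
        = pvMk3 n (pvTbl bonus (a + 1) 0 0) := by
    intro a G haa hGa
    subst hGa
    have r := pvFoldInv n (fun G b => (List.range n).foldl (fun G c => pvCellA bonus a b c G) G)
      (fun b G => G = pvMk3 n (pvTbl bonus a b 0)) _ rfl
      (fun b G hbb hGb => stepb a haa b G hbb hGb)
    refine r.trans ?_
    apply pvMk3_congr
    intro x y z _ hy _
    unfold pvTbl
    split_ifs with h1 h2 <;> first | rfl | (exfalso; omega)
  have r := pvFoldInv n
    (fun G a => (List.range n).foldl (fun G b => (List.range n).foldl (fun G c => pvCellA bonus a b c G) G) G)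
    (fun a G => G = pvMk3 n (pvTbl bonus a 0 0)) _ hinit
    (fun a G haa hGa => stepa a G haa hGa)
  refine r.trans ?_
  apply pvMk3_congr
  intro x y z hx _ _
  unfold pvTbl
  rw [if_pos (Or.inl hx)]

-- ---- B-side ----
lemma pvCellB_step (bonus : Int) (n a b c : Nat) (hbn : b < n) (hcn : c < n)
    (Ma : Option (List (List Int))) (Mb : Option (List Int))
    (hMa : Ma = if a = 0 then none else some (pvMk2 n (fun y z => pvMaxA bonus a y z)))
    (hMb : Mb = if b = 0 then none else some (pvMk1 n (fun z => pvMaxB bonus a b z)))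
    (r : List Int × Option Int)
    (hr1 : r.1 = (List.range c).map (pvG bonus a b))
    (hr2 : r.2 = pvAxC bonus a b c) :
    (pvCellB bonus a b Ma Mb r c).1 = (List.range (c + 1)).map (pvG bonus a b)
      ∧ (pvCellB bonus a b Ma Mb r c).2 = pvAxC bonus a b (c + 1) := by
  obtain ⟨row, Mc⟩ := r
  simp only at hr1 hr2
  subst hr1; subst hr2
  have h1 : (if 0 < a then pvOMaxB none ((a : Int) + pvGet2 (Ma.getD []) b c) else none)
      = Option.map (fun m => (a : Int) + m) (pvAxA bonus a b c) := by
    by_cases ha0 : 0 < a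
    · rw [if_pos ha0, hMa, if_neg (by omega)]
      simp only [Option.getD_some]
      rw [pvGet2_mk2 _ hbn hcn, pvAxA_some bonus b c ha0]
      rfl
    · have hz : a = 0 := by omega
      subst hz
      rw [if_neg (by omega)]
      rfl
  have h2 : ∀ o, (if 0 < b then pvOMaxB o ((b : Int) + (Mb.getD []).getD c 0) else o)
      = pvOMax2 o (Option.map (fun m => (b : Int) + m) (pvAxB bonus a b c)) := by
    intro o
    by_cases hb0 : 0 < b
    · rw [if_pos hb0, hMb, if_neg (by omega)]
      simp only [Option.getD_some]
      rw [pvGetD_mk1 _ _ hcn, pvAxB_some bonus a c hb0, pvOMaxB_eq_omax2]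
      rfl
    · have hz : b = 0 := by omega
      subst hz
      rw [if_neg (by omega)]
      cases o <;> rfl
  have h3 : ∀ o, (if 0 < c then pvOMaxB o ((c : Int) + (pvAxC bonus a b c).getD 0) else o)
      = pvOMax2 o (Option.map (fun m => (c : Int) + m) (pvAxC bonus a b c)) := by
    intro o
    by_cases hc0 : 0 < c
    · rw [if_pos hc0, pvOMaxB_eq_omax2]
      conv_rhs => rw [pvAxC_some bonus a b hc0]
      rfl
    · have hz : c = 0 := by omega
      subst hz
      rw [if_neg (by omega)]
      cases o <;> rfl
  have hv : (if 0 < c then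
        pvOMaxB (if 0 < b then
            pvOMaxB (if 0 < a then pvOMaxB none ((a : Int) + pvGet2 (Ma.getD []) b c) else none)
              ((b : Int) + (Mb.getD []).getD c 0)
          else (if 0 < a then pvOMaxB none ((a : Int) + pvGet2 (Ma.getD []) b c) else none))
          ((c : Int) + (pvAxC bonus a b c).getD 0)
      else (if 0 < b then
            pvOMaxB (if 0 < a then pvOMaxB none ((a : Int) + pvGet2 (Ma.getD []) b c) else none)
              ((b : Int) + (Mb.getD []).getD c 0)
          else (if 0 < a then pvOMaxB none ((a : Int) + pvGet2 (Ma.getD []) b c) else none))).getD 0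
      = pvG bonus a b c := by
    rw [h3, h2, h1, ← pvG_eq']
  constructor
  · simp only [pvCellB]
    rw [hv, List.range_succ, List.map_append]
    rfl
  · simp only [pvCellB]
    rw [hv, pvAxC_succ]
    rw [pvOMaxB_eq_omax2]
    unfold pvHC pvBeta
    rfl

lemma pvRowB_step (bonus : Int) (n a b : Nat) (hbn : b < n)
    (Ma : Option (List (List Int)))
    (hMa : Ma = if a = 0 then none else some (pvMk2 n (fun y z => pvMaxA bonus a y z)))
    (t : List (List Int) × Option (List Int))
    (ht1 : t.1 = (List.range b).map (fun y => pvMk1 n (pvG bonus a y)))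
    (ht2 : t.2 = if b = 0 then none else some (pvMk1 n (fun z => pvMaxB bonus a b z))) :
    (pvRowB bonus n a Ma t b).1 = (List.range (b + 1)).map (fun y => pvMk1 n (pvG bonus a y))
      ∧ (pvRowB bonus n a Ma t b).2
          = if b + 1 = 0 then none else some (pvMk1 n (fun z => pvMaxB bonus a (b + 1) z)) := by
  obtain ⟨layer, Mb⟩ := t
  simp only at ht1 ht2
  subst ht1
  have rinv := pvFoldInv n (pvCellB bonus a b Ma Mb)
    (fun c r => r.1 = (List.range c).map (pvG bonus a b) ∧ r.2 = pvAxC bonus a b c)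
    ([], none) ⟨rfl, rfl⟩
    (fun c r hcc hr => pvCellB_step bonus n a b c hbn hcc Ma Mb hMa ht2 r hr.1 hr.2)
  obtain ⟨hrow, _⟩ := rinv
  have hrowmk : ((List.range n).foldl (pvCellB bonus a b Ma Mb) ([], none)).1
      = pvMk1 n (pvG bonus a b) := hrow
  have hbmap : (List.range n).map (fun cc =>
        -(b : Int) - ((List.range n).foldl (pvCellB bonus a b Ma Mb) ([], none)).1.getD cc 0
          + (if a + b + cc = 0 then bonus else 0))
      = pvMk1 n (fun z => pvHB bonus a b z) := by
    apply List.map_congr_left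
    intro cc hcc
    rw [List.mem_range] at hcc
    rw [hrowmk, pvGetD_mk1 _ _ hcc]
    unfold pvHB pvBeta
    rfl
  constructor
  · simp only [pvRowB]
    rw [hrowmk, List.range_succ, List.map_append]
    rfl
  · simp only [pvRowB]
    rw [hbmap, if_neg (by omega)]
    by_cases hb0 : b = 0
    · subst hb0
      rw [ht2]
      simp only [if_pos rfl]
      apply congrArg
      apply pvMk1_congr
      intro z _
      rfl
    · rw [ht2, if_neg hb0]
      simp only []
      rw [pvZip1]
      apply congrArg
      apply pvMk1_congr
      intro z _
      exact (pvMaxB_succ bonus a z (by omega)).symm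

lemma pvLayerB_step (bonus : Int) (n a : Nat) (han : a < n)
    (s : List (List (List Int)) × Option (List (List Int)))
    (hs1 : s.1 = (List.range a).map (fun x => pvMk2 n (pvG bonus x)))
    (hs2 : s.2 = if a = 0 then none else some (pvMk2 n (fun y z => pvMaxA bonus a y z))) :
    (pvLayerB bonus n s a).1 = (List.range (a + 1)).map (fun x => pvMk2 n (pvG bonus x))
      ∧ (pvLayerB bonus n s a).2
          = if a + 1 = 0 then none else some (pvMk2 n (fun y z => pvMaxA bonus (a + 1) y z)) := by
  obtain ⟨G, Ma⟩ := s
  simp only at hs1 hs2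
  subst hs1
  have tinv := pvFoldInv n (pvRowB bonus n a Ma)
    (fun b t => t.1 = (List.range b).map (fun y => pvMk1 n (pvG bonus a y))
      ∧ t.2 = if b = 0 then none else some (pvMk1 n (fun z => pvMaxB bonus a b z)))
    ([], none) ⟨rfl, by rw [if_pos rfl]⟩
    (fun b t hbb ht => pvRowB_step bonus n a b hbb Ma hs2 t ht.1 ht.2)
  obtain ⟨hlayer, _⟩ := tinv
  have hlayermk : ((List.range n).foldl (pvRowB bonus n a Ma) ([], none)).1
      = pvMk2 n (pvG bonus a) := hlayer
  have hamap : (List.range n).map (fun bb => (List.range n).map (fun cc =>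
        -(a : Int) - pvGet2 ((List.range n).foldl (pvRowB bonus n a Ma) ([], none)).1 bb cc
          + (if a + bb + cc = 0 then bonus else 0)))
      = pvMk2 n (fun y z => pvHA bonus a y z) := by
    apply List.map_congr_left
    intro bb hbb
    rw [List.mem_range] at hbb
    apply List.map_congr_left
    intro cc hcc
    rw [List.mem_range] at hcc
    rw [hlayermk, pvGet2_mk2 _ hbb hcc]
    unfold pvHA pvBeta
    rfl
  constructor
  · simp only [pvLayerB]
    rw [hlayermk, List.range_succ, List.map_append]
    rfl
  · simp only [pvLayerB]
    rw [hamap, if_neg (by omega)]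
    by_cases ha0 : a = 0
    · subst ha0
      rw [hs2]
      simp only [if_pos rfl]
      apply congrArg
      apply pvMk2_congr
      intro y z _ _
      rfl
    · rw [hs2, if_neg ha0]
      simp only []
      rw [pvZip2]
      apply congrArg
      apply pvMk2_congr
      intro y z _ _
      exact (pvMaxA_succ bonus y z (by omega)).symm

lemma portB_eq (max_size bonus : Int) :
    scoring_nim_dp_alt max_size bonus = pvMk3 (max_size + 1).toNat (pvG bonus) := by
  simp only [scoring_nim_dp_alt]
  set n := (max_size + 1).toNat with hn
  have inv := pvFoldInv n (pvLayerB bonus n)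
    (fun a s => s.1 = (List.range a).map (fun x => pvMk2 n (pvG bonus x))
      ∧ s.2 = if a = 0 then none else some (pvMk2 n (fun y z => pvMaxA bonus a y z)))
    ([], none) ⟨rfl, by rw [if_pos rfl]⟩
    (fun a s haa hs => pvLayerB_step bonus n a haa s hs.1 hs.2)
  exact inv.1

-- ===== VERDICT (by name: the statement is the Claim_ definition above) =====
theorem scoring_nim_dp_spec : Claim_equal_scoring_nim_dp := by
  intro max_size bonus _
  unfold Spec_scoring_nim_dp
  rw [portA_eq, portB_eq]
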